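-- pv_equiv track=rewrite | github.com/ariuk44/retake_exam_prep | day_18.py | isLayered
-- ===== SOURCE A (Python) =====
-- def isLayered(arr):
--     if len(arr) < 2:
--         return 0
--     count = 1
--     for i in range(1, len(arr)):
--         if arr[i] < arr[i - 1]:
--             return 0
--         if arr[i] == arr[i - 1]:
--             count += 1
--         else:
--             if count < 2:
--                 return 0
--             count = 1
--     if count < 2:
--         return 0
--     return 1
-- ===== SOURCE B (Python) =====
-- def isLayered(arr):
--     # Build a run-length encoding (scanning from the right, prepending runs),
--     # then validate: every run has length >= 2 and run values strictly increase.
--     if len(arr) < 2: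
--         return 0
--     runs = []
--     for x in reversed(arr):
--         if runs and runs[0][0] == x:
--             runs[0] = (x, runs[0][1] + 1)
--         else:
--             runs.insert(0, (x, 1))
--     ok = all(c >= 2 for _, c in runs) and all(p[0] < q[0] for p, q in zip(runs, runs[1:]))
--     return 1 if ok else 0
-- ===== Notes on version B (the rewrite author's own statement) =====
-- stated objective: alternative
-- what changed: Replaces A's fused single index scan with early returns by a two-phase decomposition: build a run-length encoding of the array, then validate that every run has length >= 2 and that run values strictly increase.
import Mathlib
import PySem

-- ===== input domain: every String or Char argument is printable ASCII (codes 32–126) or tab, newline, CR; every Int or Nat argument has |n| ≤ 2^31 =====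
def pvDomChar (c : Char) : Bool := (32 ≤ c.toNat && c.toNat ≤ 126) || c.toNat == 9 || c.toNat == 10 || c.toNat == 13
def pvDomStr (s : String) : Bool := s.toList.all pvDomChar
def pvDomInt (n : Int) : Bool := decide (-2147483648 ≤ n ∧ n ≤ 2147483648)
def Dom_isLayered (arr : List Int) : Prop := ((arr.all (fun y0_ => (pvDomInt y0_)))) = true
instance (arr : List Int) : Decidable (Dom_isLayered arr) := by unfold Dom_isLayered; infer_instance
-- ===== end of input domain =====

-- B replaces A's fused index scan by a build-runs-then-validate decomposition
-- (run-length encoding, then check all run lengths ≥ 2 and strictly increasing run values);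
-- objective: alternative decomposition, same cost.


-- ===== PORT A =====
-- A's loop over i = 1 .. len-1 comparing arr[i] with arr[i-1], carrying `count`:
-- the obvious structural recursion over the remaining elements with state (prev = arr[i-1], count).
def isLayeredGo (prev : Int) (count : Int) : List Int → Int
  | [] => if count < 2 then 0 else 1
  | x :: rest =>
    if x < prev then 0
    else if x = prev then isLayeredGo x (count + 1) rest
    else if count < 2 then 0 else isLayeredGo x 1 rest

def isLayered (arr : List Int) : Int :=
  if arr.length < 2 then 0
  else match arr with
    | [] => 0  -- unreachable: length ≥ 2
    | x :: rest => isLayeredGo x 1 rest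

-- ===== PORT B =====
-- Source B: loop over reversed(arr) prepending/merging at the front = foldr-style structural recursion.
def runsB : List Int → List (Int × Int)
  | [] => []
  | x :: xs =>
    match runsB xs with
    | (k, c) :: r => if k = x then (x, c + 1) :: r else (x, 1) :: (k, c) :: r
    | [] => [(x, 1)]

def isLayered_alt (arr : List Int) : Int :=
  if arr.length < 2 then 0
  else
    let runs := runsB arr
    if runs.all (fun p => 2 ≤ p.2) && (runs.zip runs.tail).all (fun q => q.1.1 < q.2.1)
    then 1 else 0

-- ===== PRECONDITION & SPEC =====
def Spec_isLayered (arr : List Int) (out : Int) : Prop := out = isLayered_alt arr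
instance (arr : List Int) (out : Int) : Decidable (Spec_isLayered arr out) := by unfold Spec_isLayered; infer_instance

-- ===== CLAIM (what is proved, stated in full; the proofs are below) =====
def Claim_equal_isLayered : Prop := ∀ (arr : List Int), Dom_isLayered arr → Spec_isLayered arr (isLayered arr)

-- ===== LEMMAS AND PROOFS =====

-- the validity check B performs on a run list
def validB (rs : List (Int × Int)) : Bool :=
  rs.all (fun p => 2 ≤ p.2) && (rs.zip rs.tail).all (fun q => q.1.1 < q.2.1)

-- the run list of prev^count ++ xs (current open run merged into runsB xs)
def runsWith (prev count : Int) (xs : List Int) : List (Int × Int) :=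
  match runsB xs with
  | (k, c) :: r => if k = prev then (prev, count + c) :: r else (prev, count) :: (k, c) :: r
  | [] => [(prev, count)]

theorem runsB_head (x : Int) (xs : List Int) :
    ∃ c r, runsB (x :: xs) = (x, c) :: r := by
  cases h : runsB xs with
  | nil => exact ⟨1, [], by simp [runsB, h]⟩
  | cons p r =>
    obtain ⟨k, c⟩ := p
    by_cases hk : k = x
    · exact ⟨c + 1, r, by simp [runsB, h, hk]⟩
    · exact ⟨1, (k, c) :: r, by simp [runsB, h, hk]⟩

theorem validB_cons (prev count : Int) (rs : List (Int × Int)) :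
    validB ((prev, count) :: rs) =
      ((2 ≤ count : Bool) &&
        (match rs with | [] => true | (k, _) :: _ => decide (prev < k)) &&
        validB rs) := by
  cases rs with
  | nil => simp [validB]
  | cons p r =>
    obtain ⟨k, c⟩ := p
    simp [validB]
    by_cases h1 : (2:Int) ≤ count <;> by_cases h2 : prev < k <;>
      simp [h1, h2, Bool.and_assoc, Bool.and_comm]

theorem runsWith_eq_runsB (x : Int) (rest : List Int) :
    runsWith x 1 rest = runsB (x :: rest) := by
  cases h : runsB rest with
  | nil => simp [runsWith, runsB, h]
  | cons p r =>
    obtain ⟨k, c⟩ := p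
    by_cases hk : k = x
    · subst hk; simp [runsWith, runsB, h]; omega
    · simp [runsWith, runsB, h, hk]

theorem runsWith_merge (x count : Int) (rest : List Int) :
    runsWith x count (x :: rest) = runsWith x (count + 1) rest := by
  cases h : runsB rest with
  | nil => simp [runsWith, runsB, h]
  | cons p r =>
    obtain ⟨k, c⟩ := p
    by_cases hk : k = x
    · subst hk; simp [runsWith, runsB, h]; omega
    · simp [runsWith, runsB, h, hk]

theorem go_eq_valid (xs : List Int) : ∀ prev count : Int,
    isLayeredGo prev count xs = if validB (runsWith prev count xs) then 1 else 0 := by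
  induction xs with
  | nil =>
    intro prev count
    simp [isLayeredGo, runsWith, runsB, validB]
    omega
  | cons x rest ih =>
    intro prev count
    rcases lt_trichotomy x prev with hlt | heq | hgt
    · -- x < prev: A returns 0; B's chain check fails at prev, x
      obtain ⟨c, r, hr⟩ := runsB_head x rest
      have hne : x ≠ prev := by omega
      have hrw : runsWith prev count (x :: rest) = (prev, count) :: (x, c) :: r := by
        simp [runsWith, hr, hne]
      rw [isLayeredGo, if_pos hlt, hrw, validB_cons]
      simp [show ¬ prev < x from by omega]
    · -- x = prev: merge into the open run
      subst heq
      rw [isLayeredGo, if_neg (by omega), if_pos rfl, ih, runsWith_merge]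
    · -- x > prev: close the run (prev, count), continue with (x, 1)
      obtain ⟨c, r, hr⟩ := runsB_head x rest
      have hne : x ≠ prev := by omega
      have hrw : runsWith prev count (x :: rest) = (prev, count) :: (x, c) :: r := by
        simp [runsWith, hr, hne]
      have hv : validB ((prev, count) :: (x, c) :: r)
          = ((2 ≤ count : Bool) && decide (prev < x) && validB ((x, c) :: r)) := by
        rw [validB_cons]
      rw [isLayeredGo, if_neg (by omega), if_neg hne, ih, runsWith_eq_runsB, hr, hrw, hv]
      by_cases hc : count < 2
      · simp [hc, show ¬ ((2:Int) ≤ count) from by omega]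
      · simp [hc, show (2:Int) ≤ count from by omega, hgt]

-- ===== VERDICT (by name: the statement is the Claim_ definition above) =====
theorem isLayered_spec : Claim_equal_isLayered := by
  intro arr _
  unfold Spec_isLayered isLayered isLayered_alt
  by_cases hlen : arr.length < 2
  · simp [hlen]
  · match arr with
    | [] => simp at hlen
    | x :: rest =>
      simp only [hlen, if_false]
      rw [go_eq_valid, runsWith_eq_runsB]
      rfl
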